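-- pv_equiv track=rewrite | github.com/MrBrantCode/unitest_baseline | mut_generate/mist_train_cf/cf_54229/solution.py | largest_smallest_integers
-- ===== SOURCE A (Python) =====
-- def largest_smallest_integers(lst):
--     max_neg_even = max_neg_odd = min_non_neg_even = min_non_neg_odd = None
--
--     for num in lst:
--         if num % 2 == 0:  # num is even
--             if num >= 0:  # num is non-negative
--                 if min_non_neg_even is None or num < min_non_neg_even:
--                     min_non_neg_even = num
--             else:  # num is negative
--                 if max_neg_even is None or num > max_neg_even:
--                     max_neg_even = num
--         else:  # num is odd
--             if num >= 0:  # num is non-negative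
--                 if min_non_neg_odd is None or num < min_non_neg_odd:
--                     min_non_neg_odd = num
--             else:  # num is negative
--                 if max_neg_odd is None or num > max_neg_odd:
--                     max_neg_odd = num
--
--     return max_neg_even, min_non_neg_even, max_neg_odd, min_non_neg_odd
-- ===== SOURCE B (Python) =====
-- def largest_smallest_integers(lst):
--     max_neg_even = max((x for x in lst if x % 2 == 0 and x < 0), default=None)
--     min_non_neg_even = min((x for x in lst if x % 2 == 0 and x >= 0), default=None)
--     max_neg_odd = max((x for x in lst if x % 2 != 0 and x < 0), default=None)
--     min_non_neg_odd = min((x for x in lst if x % 2 != 0 and x >= 0), default=None)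
--     return max_neg_even, min_non_neg_even, max_neg_odd, min_non_neg_odd
-- ===== Notes on version B (the rewrite author's own statement) =====
-- stated objective: simpler
-- what changed: Replaces A's single interleaved four-accumulator branchy scan with four independent filtered reductions, each delegating the extremum to max/min with default=None.
import Mathlib
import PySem

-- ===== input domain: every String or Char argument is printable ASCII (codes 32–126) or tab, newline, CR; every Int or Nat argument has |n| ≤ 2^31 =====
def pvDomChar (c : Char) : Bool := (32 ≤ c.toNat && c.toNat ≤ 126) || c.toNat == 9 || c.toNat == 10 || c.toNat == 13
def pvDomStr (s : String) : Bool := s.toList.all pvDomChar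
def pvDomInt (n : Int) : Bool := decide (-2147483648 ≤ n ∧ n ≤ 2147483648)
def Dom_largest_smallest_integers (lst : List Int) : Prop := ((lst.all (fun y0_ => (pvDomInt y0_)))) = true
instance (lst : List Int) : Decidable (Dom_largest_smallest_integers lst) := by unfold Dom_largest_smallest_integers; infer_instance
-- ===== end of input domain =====

-- B replaces A's single interleaved four-accumulator scan by four independent filtered max/min reductions (simpler).

-- ===== PORT A =====
-- one pass, four Option accumulators, branch order as in the Python
def lsiStep (s : Option Int × Option Int × Option Int × Option Int) (num : Int) :
    Option Int × Option Int × Option Int × Option Int :=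
  match s with
  | (mne, nne, mno, nno) =>
    if PySem.Int.mod num 2 = 0 then
      if num ≥ 0 then
        match nne with
        | none => (mne, some num, mno, nno)
        | some m => if num < m then (mne, some num, mno, nno) else (mne, nne, mno, nno)
      else
        match mne with
        | none => (some num, nne, mno, nno)
        | some m => if num > m then (some num, nne, mno, nno) else (mne, nne, mno, nno)
    else
      if num ≥ 0 then
        match nno with
        | none => (mne, nne, mno, some num)
        | some m => if num < m then (mne, nne, mno, some num) else (mne, nne, mno, nno)
      else
        match mno with
        | none => (mne, nne, some num, nno)
        | some m => if num > m then (mne, nne, some num, nno) else (mne, nne, mno, nno)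

def largest_smallest_integers (lst : List Int) : Option Int × Option Int × Option Int × Option Int :=
  lst.foldl lsiStep (none, none, none, none)

-- ===== PORT B =====
def largest_smallest_integers_alt (lst : List Int) : Option Int × Option Int × Option Int × Option Int :=
  (PySem.List.max? (lst.filter (fun x => PySem.Int.mod x 2 == 0 && decide (x < 0))) (fun y => y),
   PySem.List.min? (lst.filter (fun x => PySem.Int.mod x 2 == 0 && decide (x ≥ 0))) (fun y => y),
   PySem.List.max? (lst.filter (fun x => PySem.Int.mod x 2 != 0 && decide (x < 0))) (fun y => y),
   PySem.List.min? (lst.filter (fun x => PySem.Int.mod x 2 != 0 && decide (x ≥ 0))) (fun y => y))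

-- ===== PRECONDITION & SPEC =====
def Spec_largest_smallest_integers (lst : List Int) (out : Option Int × Option Int × Option Int × Option Int) : Prop := out = largest_smallest_integers_alt lst
instance (lst : List Int) (out : Option Int × Option Int × Option Int × Option Int) : Decidable (Spec_largest_smallest_integers lst out) := by unfold Spec_largest_smallest_integers; infer_instance

-- ===== CLAIM (what is proved, stated in full; the proofs are below) =====
def Claim_equal_largest_smallest_integers : Prop := ∀ (lst : List Int), Dom_largest_smallest_integers lst → Spec_largest_smallest_integers lst (largest_smallest_integers lst)

-- ===== LEMMAS AND PROOFS =====

/-- A's "new max" update on one Option accumulator. -/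
def gmax (a : Option Int) (l : List Int) : Option Int :=
  l.foldl (fun a x => match a with
    | none => some x
    | some m => if x > m then some x else some m) a

/-- A's "new min" update on one Option accumulator. -/
def gmin (a : Option Int) (l : List Int) : Option Int :=
  l.foldl (fun a x => match a with
    | none => some x
    | some m => if x < m then some x else some m) a

theorem gmax_some (t : List Int) : ∀ a : Int, gmax (some a) t = some (t.foldl max a) := by
  induction t with
  | nil => intro a; rfl
  | cons x t ih =>
    intro a
    simp only [gmax, List.foldl] at ih ⊢
    by_cases h : x > a
    · rw [if_pos h, ih x, show max a x = x from by omega]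
    · rw [if_neg h, ih a, show max a x = a from by omega]

theorem gmin_some (t : List Int) : ∀ a : Int, gmin (some a) t = some (t.foldl min a) := by
  induction t with
  | nil => intro a; rfl
  | cons x t ih =>
    intro a
    simp only [gmin, List.foldl] at ih ⊢
    by_cases h : x < a
    · rw [if_pos h, ih x, show min a x = x from by omega]
    · rw [if_neg h, ih a, show min a x = a from by omega]

theorem gmax_none_eq_max? (l : List Int) : gmax none l = PySem.List.max? l (fun y => y) := by
  cases l with
  | nil => rfl
  | cons x t =>
    rw [PySem.List.max?_id_cons]
    simpa [gmax, List.foldl] using gmax_some t x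

theorem gmin_none_eq_min? (l : List Int) : gmin none l = PySem.List.min? l (fun y => y) := by
  cases l with
  | nil => rfl
  | cons x t =>
    rw [PySem.List.min?_id_cons]
    simpa [gmin, List.foldl] using gmin_some t x

theorem foldl_lsiStep (lst : List Int) :
    ∀ s : Option Int × Option Int × Option Int × Option Int,
    lst.foldl lsiStep s =
      (gmax s.1 (lst.filter (fun x => PySem.Int.mod x 2 == 0 && decide (x < 0))),
       gmin s.2.1 (lst.filter (fun x => PySem.Int.mod x 2 == 0 && decide (x ≥ 0))),
       gmax s.2.2.1 (lst.filter (fun x => PySem.Int.mod x 2 != 0 && decide (x < 0))),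
       gmin s.2.2.2 (lst.filter (fun x => PySem.Int.mod x 2 != 0 && decide (x ≥ 0)))) := by
  induction lst with
  | nil => intro s; rfl
  | cons x t ih =>
    intro s
    obtain ⟨mne, nne, mno, nno⟩ := s
    simp only [List.foldl_cons, List.filter_cons]
    rw [ih]
    by_cases he : PySem.Int.mod x 2 = 0 <;> by_cases hn : x ≥ 0
    all_goals
      first
      | (have hd : (2:Int) ∣ x := (PySem.Int.mod_eq_zero_iff_dvd x 2).mp he
         have hm : x % 2 = 0 := by omega)
      | (have hd : ¬ (2:Int) ∣ x := fun h => he ((PySem.Int.mod_eq_zero_iff_dvd x 2).mpr h)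
         have hm : x % 2 = 1 := by omega)
    all_goals
      simp [lsiStep, he, hn, hd, hm, gmax, gmin,
        show ((x < 0) ↔ ¬ (0:Int) ≤ x) from by omega] <;>
      cases mne <;> cases nne <;> cases mno <;> cases nno <;>
      (first
      | rfl
      | ((repeat' apply And.intro) <;> dsimp only <;> (try split_ifs) <;> rfl))

-- ===== VERDICT (by name: the statement is the Claim_ definition above) =====
theorem largest_smallest_integers_spec : Claim_equal_largest_smallest_integers := by
  intro lst _
  unfold Spec_largest_smallest_integers largest_smallest_integers largest_smallest_integers_alt
  rw [foldl_lsiStep]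
  simp [gmax_none_eq_max?, gmin_none_eq_min?]
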